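-- pv_equiv track=rewrite | github.com/a-gavriel/Intro-Taller | Otros-Ejercicios/suma_par_impar_pila.py | suma_impar_aux
-- ===== SOURCE A (Python) =====
-- def suma_impar_aux(num):
--     if num==0:
--         return 0
--     else:
--         if num%2!=0:
--             return num%10 + suma_impar_aux(num//10)
--         else:
--             return suma_impar_aux(num//10)
-- ===== SOURCE B (Python) =====
-- def suma_impar_aux(num):
--     digits = []
--     while num != 0:
--         digits.append(num % 10)
--         num //= 10
--     return sum(d for d in digits if d % 2 == 1)
-- ===== Notes on version B (the rewrite author's own statement) =====
-- stated objective: alternative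
-- what changed: Instead of a recursion that interleaves parity testing with descent, B first materialises the list of digits with a loop and then sums the odd ones with a filter+sum pass (two staged passes, digit-parity test instead of number-parity test).
import Mathlib
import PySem

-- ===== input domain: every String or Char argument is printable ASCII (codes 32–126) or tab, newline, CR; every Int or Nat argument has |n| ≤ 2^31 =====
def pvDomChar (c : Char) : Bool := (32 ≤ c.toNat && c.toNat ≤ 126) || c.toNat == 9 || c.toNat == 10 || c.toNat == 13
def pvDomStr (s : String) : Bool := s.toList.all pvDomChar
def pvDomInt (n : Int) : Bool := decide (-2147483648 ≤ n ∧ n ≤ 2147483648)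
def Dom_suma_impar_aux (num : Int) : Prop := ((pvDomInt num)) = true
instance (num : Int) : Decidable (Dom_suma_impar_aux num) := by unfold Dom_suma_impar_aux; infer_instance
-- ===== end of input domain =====

-- B first builds the list of digits, then sums the odd ones (objective: alternative decomposition).
-- Both ports use a fuel of num.toNat + 1, exact for every num ≥ 0 (Pre_); Python A raises RecursionError on num < 0.

-- ===== PORT A =====
-- literal port of A's recursion; fuel bounds the depth (sufficient whenever num ≥ 0)
def sumaAux_A : Nat → Int → Int
  | 0, _ => 0
  | f+1, num =>
    if num = 0 then 0
    else
      if PySem.Int.mod num 2 ≠ 0 then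
        PySem.Int.mod num 10 + sumaAux_A f (PySem.Int.floordiv num 10)
      else
        sumaAux_A f (PySem.Int.floordiv num 10)

def suma_impar_aux (num : Int) : Int := sumaAux_A (num.toNat + 1) num

-- ===== PORT B =====
-- literal port of B's digit-collecting while-loop (appends num % 10 each step)
def digitsOf : Nat → Int → List Int
  | 0, _ => []
  | f+1, num =>
    if num = 0 then []
    else PySem.Int.mod num 10 :: digitsOf f (PySem.Int.floordiv num 10)

-- literal port of B's final pass: sum(d for d in digits if d % 2 == 1)
def suma_impar_aux_alt (num : Int) : Int :=
  ((digitsOf (num.toNat + 1) num).filter (fun d => PySem.Int.mod d 2 = 1)).sum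

-- ===== PRECONDITION & SPEC =====
-- Pre_ excludes num < 0, on which Python A raises RecursionError (num//10 never reaches 0).
def Pre_suma_impar_aux (num : Int) : Prop := 0 ≤ num
instance (num : Int) : Decidable (Pre_suma_impar_aux num) := by unfold Pre_suma_impar_aux; infer_instance
def pvWitness_suma_impar_aux : Int := (1234)

def Spec_suma_impar_aux (num : Int) (out : Int) : Prop := out = suma_impar_aux_alt num
instance (num : Int) (out : Int) : Decidable (Spec_suma_impar_aux num out) := by unfold Spec_suma_impar_aux; infer_instance

-- ===== CLAIM (what is proved, stated in full; the proofs are below) =====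
def Claim_equal_suma_impar_aux : Prop := ∀ (num : Int), Dom_suma_impar_aux num → Pre_suma_impar_aux num → Spec_suma_impar_aux num (suma_impar_aux num)

-- ===== LEMMAS AND PROOFS =====

lemma floordiv_ten_lt (num : Int) (h0 : 0 < num) : PySem.Int.floordiv num 10 < num := by
  rw [PySem.Int.floordiv_eq_ediv_of_pos (by norm_num)]
  omega

lemma floordiv_ten_nonneg (num : Int) (h0 : 0 ≤ num) : 0 ≤ PySem.Int.floordiv num 10 := by
  rw [PySem.Int.floordiv_eq_ediv_of_pos (by norm_num)]
  exact Int.ediv_nonneg h0 (by norm_num)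

-- A's test "num % 2 != 0" coincides with B's digit test "(num % 10) % 2 == 1"
lemma parity_bridge (num : Int) :
    (PySem.Int.mod (PySem.Int.mod num 10) 2 = 1) ↔ (PySem.Int.mod num 2 ≠ 0) := by
  rw [PySem.Int.mod_eq_emod_of_pos (by norm_num), PySem.Int.mod_eq_emod_of_pos (by norm_num),
      PySem.Int.mod_eq_emod_of_pos (by norm_num)]
  omega

lemma sumaAux_A_eq_sum (f : Nat) : ∀ (num : Int), 0 ≤ num → num.toNat ≤ f →
    sumaAux_A (f+1) num = ((digitsOf (f+1) num).filter (fun d => PySem.Int.mod d 2 = 1)).sum := by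
  induction f with
  | zero =>
    intro num h0 hf
    have : num = 0 := by omega
    subst this
    simp [sumaAux_A, digitsOf]
  | succ f ih =>
    intro num h0 hf
    by_cases hz : num = 0
    · subst hz; simp [sumaAux_A, digitsOf]
    · have hpos : 0 < num := lt_of_le_of_ne h0 (Ne.symm hz)
      have hlt := floordiv_ten_lt num hpos
      have hnn := floordiv_ten_nonneg num h0
      have hfuel : (PySem.Int.floordiv num 10).toNat ≤ f := by omega
      have hA : sumaAux_A (f+1+1) num =
          if num = 0 then 0
          else if PySem.Int.mod num 2 ≠ 0 then
            PySem.Int.mod num 10 + sumaAux_A (f+1) (PySem.Int.floordiv num 10)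
          else sumaAux_A (f+1) (PySem.Int.floordiv num 10) := rfl
      have hD : digitsOf (f+1+1) num =
          if num = 0 then []
          else PySem.Int.mod num 10 :: digitsOf (f+1) (PySem.Int.floordiv num 10) := rfl
      rw [hA, hD, if_neg hz, if_neg hz, List.filter_cons]
      by_cases hp : PySem.Int.mod num 2 ≠ 0
      · have hdec : (decide (PySem.Int.mod (PySem.Int.mod num 10) 2 = 1)) = true :=
          decide_eq_true ((parity_bridge num).mpr hp)
        rw [if_pos hp, hdec, if_pos rfl, List.sum_cons, ih _ hnn hfuel]
      · have hdec : (decide (PySem.Int.mod (PySem.Int.mod num 10) 2 = 1)) = false :=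
          decide_eq_false (fun hc => hp ((parity_bridge num).mp hc))
        rw [if_neg hp, hdec]
        simp only [Bool.false_eq_true, if_false]
        exact ih _ hnn hfuel

-- ===== VERDICT (by name: the statement is the Claim_ definition above) =====
theorem suma_impar_aux_spec : Claim_equal_suma_impar_aux := by
  intro num _ hpre
  unfold Spec_suma_impar_aux suma_impar_aux suma_impar_aux_alt
  exact sumaAux_A_eq_sum num.toNat num hpre (le_refl _)
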